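-- pv_equiv track=rewrite | github.com/uclaacm/lactf-archive | 2024/crypto/pprngc/super_secret_stuff.py | f
-- ===== SOURCE A (Python) =====
-- perm = [i for i in range(16)]
--
-- def f(x):
--     arr = int_to_array(x)
--
--     map_lfsr7_to_arr = {0:perm[0], 1:perm[1], 2:perm[2], 3:perm[3], 4:perm[4], 5:perm[5], 6:perm[6]}
--     lfsr7 = [arr[map_lfsr7_to_arr[i]] for i in range(7)]
--     lfsr7_new_bit = lfsr7[0] ^ lfsr7[1] ^ 1
--     lfsr7.pop(0)
--     lfsr7.append(lfsr7_new_bit)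
--
--     map_lfsr5_to_arr = {0:perm[7], 1:perm[8], 2:perm[9], 3:perm[10], 4:perm[11]}
--     lfsr5 = [arr[map_lfsr5_to_arr[j]] for j in range(5)]
--     lfsr5_new_bit = lfsr5[4] ^ lfsr5[2] ^ 1
--     lfsr5.pop()
--     lfsr5.insert(0, lfsr5_new_bit)
--     lfsr5_flipped = [1 if i == 0 else 0 for i in lfsr5]
--
--     map_countup_to_arr = {0:perm[12], 1:perm[13], 2:perm[14], 3:perm[15]}
--     countup = array_to_int([arr[map_countup_to_arr[k]] for k in range(4)])
--     countup = (countup + 1) % 16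
--     countup_arr = int_to_array(countup, 4)
--
--     for i in range(7):
--         arr[map_lfsr7_to_arr[i]] = lfsr7[i]
--     for j in range(5):
--         arr[map_lfsr5_to_arr[j]] = lfsr5_flipped[j]
--     for k in range(4):
--         arr[map_countup_to_arr[k]] = countup_arr[k]
--
--     return array_to_int(arr)
--
-- def int_to_array(x, length=16):
--     return [int(i) for i in format(x, 'b').zfill(length)]
--
-- def array_to_int(arr):
--     return int("".join(str(i) for i in arr), 2)
-- ===== SOURCE B (Python) =====
-- # One PRNG step on the 16 leading bits of x, done with integer shifts/masks
-- # instead of digit lists built by string formatting.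
--
-- def _lfsr7(l7):
--     # l7 holds arr[0..6] (arr[0] = bit 6); drop the front bit, append the new one
--     new = ((l7 >> 6) ^ (l7 >> 5) ^ 1) & 1
--     return ((l7 << 1) | new) & 0x7F
--
-- def _lfsr5(l5):
--     # l5 holds arr[7..11]; insert the new bit in front, drop the last, flip all
--     new = (l5 ^ (l5 >> 2) ^ 1) & 1
--     return ((new << 4) | (l5 >> 1)) ^ 0x1F
--
-- def _step16(hi):
--     # hi = the 16 leading bits; low 4 bits are the counter
--     return (_lfsr7((hi >> 9) & 0x7F) << 9) | (_lfsr5((hi >> 4) & 0x1F) << 4) | ((hi + 1) & 0xF)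
--
-- def f(x):
--     if x < 0:
--         raise ValueError("state must be non-negative")
--     s = max(x.bit_length(), 16) - 16          # bits of x below the 16-bit window
--     return (_step16(x >> s) << s) | (x & ((1 << s) - 1))
-- ===== Notes on version B (the rewrite author's own statement) =====
-- stated objective: alternative
-- what changed: Replaces binary string formatting, digit lists, index-map dicts and string re-parsing with integer shift/mask arithmetic on the leading 16-bit window of x.
import Mathlib
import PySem

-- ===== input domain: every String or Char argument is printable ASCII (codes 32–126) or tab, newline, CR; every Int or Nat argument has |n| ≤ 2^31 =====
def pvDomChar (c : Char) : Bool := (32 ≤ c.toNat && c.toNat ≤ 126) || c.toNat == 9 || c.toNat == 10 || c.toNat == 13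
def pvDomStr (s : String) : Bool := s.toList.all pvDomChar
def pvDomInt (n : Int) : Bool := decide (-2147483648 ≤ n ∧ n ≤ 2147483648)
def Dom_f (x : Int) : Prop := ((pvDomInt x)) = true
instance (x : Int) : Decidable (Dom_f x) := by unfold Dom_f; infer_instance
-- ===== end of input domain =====

-- B replaces A's binary-string formatting, digit lists, index dicts and string re-parsing
-- by integer shift/mask arithmetic on the leading 16-bit window of x (alternative algorithm).

-- ===== PORT A =====

-- perm = [i for i in range(16)]
def perm : List Int := PySem.List.pyRange 0 16 1

-- int_to_array(x, length): [int(i) for i in format(x, 'b').zfill(length)].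
-- int(i) is ported with PySem.Int.ofChars? on the single character; under Pre_f every
-- character is a binary digit, so the .getD 0 default is never the result Python lacks.
def chInt (c : Char) : Int := (PySem.Int.ofChars? [c]).getD 0   -- int(i) on one character

def int_to_array (x : Int) (length : Int) : List Int :=
  (PySem.Chars.zfill (PySem.Int.toBinChars x) length).map chInt

-- array_to_int(arr) = int("".join(str(i) for i in arr), 2): the join is flatMap of str(i)
-- (PySem.Int.toChars); int(s, 2) is hand-ported as the base-2 digit fold, exact for the
-- non-empty strings of '0'/'1' characters this program feeds it (no sign/space/underscore).
def array_to_int (arr : List Int) : Int :=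
  (arr.flatMap (fun i => PySem.Int.toChars i)).foldl
    (fun a c => 2 * a + ((c.toNat : Int) - 48)) 0

-- the three index-map dicts of f, hoisted as named helpers (values are perm lookups)
def f_map7 : PySem.Dict Int Int := PySem.Dict.ofList
  [(0, PySem.List.pyGetD perm 0 0), (1, PySem.List.pyGetD perm 1 0), (2, PySem.List.pyGetD perm 2 0),
   (3, PySem.List.pyGetD perm 3 0), (4, PySem.List.pyGetD perm 4 0), (5, PySem.List.pyGetD perm 5 0),
   (6, PySem.List.pyGetD perm 6 0)]
def f_map5 : PySem.Dict Int Int := PySem.Dict.ofList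
  [(0, PySem.List.pyGetD perm 7 0), (1, PySem.List.pyGetD perm 8 0), (2, PySem.List.pyGetD perm 9 0),
   (3, PySem.List.pyGetD perm 10 0), (4, PySem.List.pyGetD perm 11 0)]
def f_mapc : PySem.Dict Int Int := PySem.Dict.ofList
  [(0, PySem.List.pyGetD perm 12 0), (1, PySem.List.pyGetD perm 13 0),
   (2, PySem.List.pyGetD perm 14 0), (3, PySem.List.pyGetD perm 15 0)]

def f (x : Int) : Int :=
  let arr := int_to_array x 16
  let map7 := f_map7
  let lfsr7 := (PySem.List.pyRange 0 7 1).map (fun i => PySem.List.pyGetD arr (PySem.Dict.getD map7 i 0) 0)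
  let lfsr7_new_bit := PySem.Int.bxor (PySem.Int.bxor (PySem.List.pyGetD lfsr7 0 0) (PySem.List.pyGetD lfsr7 1 0)) 1
  let lfsr7 := ((PySem.List.pop? lfsr7 0).map Prod.snd).getD lfsr7    -- lfsr7.pop(0)
  let lfsr7 := lfsr7 ++ [lfsr7_new_bit]                               -- lfsr7.append(...)
  let map5 := f_map5
  let lfsr5 := (PySem.List.pyRange 0 5 1).map (fun j => PySem.List.pyGetD arr (PySem.Dict.getD map5 j 0) 0)
  let lfsr5_new_bit := PySem.Int.bxor (PySem.Int.bxor (PySem.List.pyGetD lfsr5 4 0) (PySem.List.pyGetD lfsr5 2 0)) 1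
  let lfsr5 := ((PySem.List.pop? lfsr5 (-1)).map Prod.snd).getD lfsr5 -- lfsr5.pop()
  let lfsr5 := PySem.List.insert lfsr5 0 lfsr5_new_bit                -- lfsr5.insert(0, ...)
  let lfsr5_flipped := lfsr5.map (fun i => if i = 0 then (1 : Int) else 0)
  let mapc := f_mapc
  let countup := array_to_int ((PySem.List.pyRange 0 4 1).map (fun k => PySem.List.pyGetD arr (PySem.Dict.getD mapc k 0) 0))
  let countup := PySem.Int.mod (countup + 1) 16
  let countup_arr := int_to_array countup 4
  let arr := (PySem.List.pyRange 0 7 1).foldl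
    (fun a i => PySem.List.pySetD a (PySem.Dict.getD map7 i 0) (PySem.List.pyGetD lfsr7 i 0)) arr
  let arr := (PySem.List.pyRange 0 5 1).foldl
    (fun a j => PySem.List.pySetD a (PySem.Dict.getD map5 j 0) (PySem.List.pyGetD lfsr5_flipped j 0)) arr
  let arr := (PySem.List.pyRange 0 4 1).foldl
    (fun a k => PySem.List.pySetD a (PySem.Dict.getD mapc k 0) (PySem.List.pyGetD countup_arr k 0)) arr
  array_to_int arr

-- ===== PORT B =====
-- Source B raises ValueError on x < 0 (as A does); those inputs are outside Pre_f, so the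
-- port below is Source B's arithmetic for the non-negative inputs the claim covers.

-- _lfsr7(l7) from Source B
def f_alt_lfsr7 (l7 : Int) : Int :=
  let new := PySem.Int.band (PySem.Int.bxor (PySem.Int.bxor (l7 >>> (6:Nat)) (l7 >>> (5:Nat))) 1) 1
  PySem.Int.band (PySem.Int.bor (l7 <<< (1:Nat)) new) 0x7F

-- _lfsr5(l5) from Source B
def f_alt_lfsr5 (l5 : Int) : Int :=
  let new := PySem.Int.band (PySem.Int.bxor (PySem.Int.bxor l5 (l5 >>> (2:Nat))) 1) 1
  PySem.Int.bxor (PySem.Int.bor (new <<< (4:Nat)) (l5 >>> (1:Nat))) 0x1F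

-- _step16(hi) from Source B
def f_alt_step16 (hi : Int) : Int :=
  PySem.Int.bor (PySem.Int.bor
    ((f_alt_lfsr7 (PySem.Int.band (hi >>> (9:Nat)) 0x7F)) <<< (9:Nat))
    ((f_alt_lfsr5 (PySem.Int.band (hi >>> (4:Nat)) 0x1F)) <<< (4:Nat)))
    (PySem.Int.band (hi + 1) 0xF)

-- f(x) from Source B; s = max(x.bit_length(), 16) - 16 is ≥ 0 in Python, kept as a Nat shift count
def f_alt (x : Int) : Int :=
  let s : Nat := max (PySem.Int.bitLength x) 16 - 16
  PySem.Int.bor (f_alt_step16 (x >>> s) <<< s) (PySem.Int.band x ((1 <<< s) - 1))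

-- ===== PRECONDITION & SPEC =====
-- A raises ValueError on x < 0 (int() meets the '-' sign of format(x,'b')); B raises there
-- too, so Pre_f keeps x ≥ 0 and excludes nothing on which A returns.
def Pre_f (x : Int) : Prop := 0 ≤ x
instance (x : Int) : Decidable (Pre_f x) := by unfold Pre_f; infer_instance
def pvWitness_f : Int := (98765)

def Spec_f (x : Int) (out : Int) : Prop := out = f_alt x
instance (x : Int) (out : Int) : Decidable (Spec_f x out) := by unfold Spec_f; infer_instance

-- ===== CLAIM (what is proved, stated in full; the proofs are below) =====
def Claim_equal_f : Prop := ∀ (x : Int), Dom_f x → Pre_f x → Spec_f x (f x)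


-- the loop body of f as a function of the start array (f x = array_to_int (fCore (int_to_array x 16)) by rfl)
def fCore (arr : List Int) : List Int :=
  let map7 := f_map7
  let lfsr7 := (PySem.List.pyRange 0 7 1).map (fun i => PySem.List.pyGetD arr (PySem.Dict.getD map7 i 0) 0)
  let lfsr7_new_bit := PySem.Int.bxor (PySem.Int.bxor (PySem.List.pyGetD lfsr7 0 0) (PySem.List.pyGetD lfsr7 1 0)) 1
  let lfsr7 := ((PySem.List.pop? lfsr7 0).map Prod.snd).getD lfsr7
  let lfsr7 := lfsr7 ++ [lfsr7_new_bit]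
  let map5 := f_map5
  let lfsr5 := (PySem.List.pyRange 0 5 1).map (fun j => PySem.List.pyGetD arr (PySem.Dict.getD map5 j 0) 0)
  let lfsr5_new_bit := PySem.Int.bxor (PySem.Int.bxor (PySem.List.pyGetD lfsr5 4 0) (PySem.List.pyGetD lfsr5 2 0)) 1
  let lfsr5 := ((PySem.List.pop? lfsr5 (-1)).map Prod.snd).getD lfsr5
  let lfsr5 := PySem.List.insert lfsr5 0 lfsr5_new_bit
  let lfsr5_flipped := lfsr5.map (fun i => if i = 0 then (1 : Int) else 0)
  let mapc := f_mapc
  let countup := array_to_int ((PySem.List.pyRange 0 4 1).map (fun k => PySem.List.pyGetD arr (PySem.Dict.getD mapc k 0) 0))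
  let countup := PySem.Int.mod (countup + 1) 16
  let countup_arr := int_to_array countup 4
  let arr := (PySem.List.pyRange 0 7 1).foldl
    (fun a i => PySem.List.pySetD a (PySem.Dict.getD map7 i 0) (PySem.List.pyGetD lfsr7 i 0)) arr
  let arr := (PySem.List.pyRange 0 5 1).foldl
    (fun a j => PySem.List.pySetD a (PySem.Dict.getD map5 j 0) (PySem.List.pyGetD lfsr5_flipped j 0)) arr
  let arr := (PySem.List.pyRange 0 4 1).foldl
    (fun a k => PySem.List.pySetD a (PySem.Dict.getD mapc k 0) (PySem.List.pyGetD countup_arr k 0)) arr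
  arr

-- small index-evaluation lemmas for reads/writes on cons lists
theorem pvG0 (a0 : Int) (t : List Int) (d : Int) : PySem.List.pyGetD (a0::t) 0 d = a0 := by simp [pysem]
theorem pvG1 (a0 a1 : Int) (t : List Int) (d : Int) : PySem.List.pyGetD (a0::a1::t) 1 d = a1 := by simp [pysem]
theorem pvG2 (a0 a1 a2 : Int) (t : List Int) (d : Int) : PySem.List.pyGetD (a0::a1::a2::t) 2 d = a2 := by simp [pysem]
theorem pvG3 (a0 a1 a2 a3 : Int) (t : List Int) (d : Int) : PySem.List.pyGetD (a0::a1::a2::a3::t) 3 d = a3 := by simp [pysem]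
theorem pvG4 (a0 a1 a2 a3 a4 : Int) (t : List Int) (d : Int) : PySem.List.pyGetD (a0::a1::a2::a3::a4::t) 4 d = a4 := by simp [pysem]
theorem pvG5 (a0 a1 a2 a3 a4 a5 : Int) (t : List Int) (d : Int) : PySem.List.pyGetD (a0::a1::a2::a3::a4::a5::t) 5 d = a5 := by simp [pysem]
theorem pvG6 (a0 a1 a2 a3 a4 a5 a6 : Int) (t : List Int) (d : Int) : PySem.List.pyGetD (a0::a1::a2::a3::a4::a5::a6::t) 6 d = a6 := by simp [pysem]
theorem pvG7 (a0 a1 a2 a3 a4 a5 a6 a7 : Int) (t : List Int) (d : Int) : PySem.List.pyGetD (a0::a1::a2::a3::a4::a5::a6::a7::t) 7 d = a7 := by simp [pysem]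
theorem pvG8 (a0 a1 a2 a3 a4 a5 a6 a7 a8 : Int) (t : List Int) (d : Int) : PySem.List.pyGetD (a0::a1::a2::a3::a4::a5::a6::a7::a8::t) 8 d = a8 := by simp [pysem]
theorem pvG9 (a0 a1 a2 a3 a4 a5 a6 a7 a8 a9 : Int) (t : List Int) (d : Int) : PySem.List.pyGetD (a0::a1::a2::a3::a4::a5::a6::a7::a8::a9::t) 9 d = a9 := by simp [pysem]
theorem pvG10 (a0 a1 a2 a3 a4 a5 a6 a7 a8 a9 a10 : Int) (t : List Int) (d : Int) : PySem.List.pyGetD (a0::a1::a2::a3::a4::a5::a6::a7::a8::a9::a10::t) 10 d = a10 := by simp [pysem]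
theorem pvG11 (a0 a1 a2 a3 a4 a5 a6 a7 a8 a9 a10 a11 : Int) (t : List Int) (d : Int) : PySem.List.pyGetD (a0::a1::a2::a3::a4::a5::a6::a7::a8::a9::a10::a11::t) 11 d = a11 := by simp [pysem]
theorem pvG12 (a0 a1 a2 a3 a4 a5 a6 a7 a8 a9 a10 a11 a12 : Int) (t : List Int) (d : Int) : PySem.List.pyGetD (a0::a1::a2::a3::a4::a5::a6::a7::a8::a9::a10::a11::a12::t) 12 d = a12 := by simp [pysem]
theorem pvG13 (a0 a1 a2 a3 a4 a5 a6 a7 a8 a9 a10 a11 a12 a13 : Int) (t : List Int) (d : Int) : PySem.List.pyGetD (a0::a1::a2::a3::a4::a5::a6::a7::a8::a9::a10::a11::a12::a13::t) 13 d = a13 := by simp [pysem]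
theorem pvG14 (a0 a1 a2 a3 a4 a5 a6 a7 a8 a9 a10 a11 a12 a13 a14 : Int) (t : List Int) (d : Int) : PySem.List.pyGetD (a0::a1::a2::a3::a4::a5::a6::a7::a8::a9::a10::a11::a12::a13::a14::t) 14 d = a14 := by simp [pysem]
theorem pvG15 (a0 a1 a2 a3 a4 a5 a6 a7 a8 a9 a10 a11 a12 a13 a14 a15 : Int) (t : List Int) (d : Int) : PySem.List.pyGetD (a0::a1::a2::a3::a4::a5::a6::a7::a8::a9::a10::a11::a12::a13::a14::a15::t) 15 d = a15 := by simp [pysem]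
theorem pvS0 (a0 : Int) (t : List Int) (v : Int) : PySem.List.pySetD (a0::t) 0 v = v::t := by simp [pysem]
theorem pvS1 (a0 a1 : Int) (t : List Int) (v : Int) : PySem.List.pySetD (a0::a1::t) 1 v = a0::v::t := by simp [pysem]
theorem pvS2 (a0 a1 a2 : Int) (t : List Int) (v : Int) : PySem.List.pySetD (a0::a1::a2::t) 2 v = a0::a1::v::t := by simp [pysem]
theorem pvS3 (a0 a1 a2 a3 : Int) (t : List Int) (v : Int) : PySem.List.pySetD (a0::a1::a2::a3::t) 3 v = a0::a1::a2::v::t := by simp [pysem]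
theorem pvS4 (a0 a1 a2 a3 a4 : Int) (t : List Int) (v : Int) : PySem.List.pySetD (a0::a1::a2::a3::a4::t) 4 v = a0::a1::a2::a3::v::t := by simp [pysem]
theorem pvS5 (a0 a1 a2 a3 a4 a5 : Int) (t : List Int) (v : Int) : PySem.List.pySetD (a0::a1::a2::a3::a4::a5::t) 5 v = a0::a1::a2::a3::a4::v::t := by simp [pysem]
theorem pvS6 (a0 a1 a2 a3 a4 a5 a6 : Int) (t : List Int) (v : Int) : PySem.List.pySetD (a0::a1::a2::a3::a4::a5::a6::t) 6 v = a0::a1::a2::a3::a4::a5::v::t := by simp [pysem]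
theorem pvS7 (a0 a1 a2 a3 a4 a5 a6 a7 : Int) (t : List Int) (v : Int) : PySem.List.pySetD (a0::a1::a2::a3::a4::a5::a6::a7::t) 7 v = a0::a1::a2::a3::a4::a5::a6::v::t := by simp [pysem]
theorem pvS8 (a0 a1 a2 a3 a4 a5 a6 a7 a8 : Int) (t : List Int) (v : Int) : PySem.List.pySetD (a0::a1::a2::a3::a4::a5::a6::a7::a8::t) 8 v = a0::a1::a2::a3::a4::a5::a6::a7::v::t := by simp [pysem]
theorem pvS9 (a0 a1 a2 a3 a4 a5 a6 a7 a8 a9 : Int) (t : List Int) (v : Int) : PySem.List.pySetD (a0::a1::a2::a3::a4::a5::a6::a7::a8::a9::t) 9 v = a0::a1::a2::a3::a4::a5::a6::a7::a8::v::t := by simp [pysem]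
theorem pvS10 (a0 a1 a2 a3 a4 a5 a6 a7 a8 a9 a10 : Int) (t : List Int) (v : Int) : PySem.List.pySetD (a0::a1::a2::a3::a4::a5::a6::a7::a8::a9::a10::t) 10 v = a0::a1::a2::a3::a4::a5::a6::a7::a8::a9::v::t := by simp [pysem]
theorem pvS11 (a0 a1 a2 a3 a4 a5 a6 a7 a8 a9 a10 a11 : Int) (t : List Int) (v : Int) : PySem.List.pySetD (a0::a1::a2::a3::a4::a5::a6::a7::a8::a9::a10::a11::t) 11 v = a0::a1::a2::a3::a4::a5::a6::a7::a8::a9::a10::v::t := by simp [pysem]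
theorem pvS12 (a0 a1 a2 a3 a4 a5 a6 a7 a8 a9 a10 a11 a12 : Int) (t : List Int) (v : Int) : PySem.List.pySetD (a0::a1::a2::a3::a4::a5::a6::a7::a8::a9::a10::a11::a12::t) 12 v = a0::a1::a2::a3::a4::a5::a6::a7::a8::a9::a10::a11::v::t := by simp [pysem]
theorem pvS13 (a0 a1 a2 a3 a4 a5 a6 a7 a8 a9 a10 a11 a12 a13 : Int) (t : List Int) (v : Int) : PySem.List.pySetD (a0::a1::a2::a3::a4::a5::a6::a7::a8::a9::a10::a11::a12::a13::t) 13 v = a0::a1::a2::a3::a4::a5::a6::a7::a8::a9::a10::a11::a12::v::t := by simp [pysem]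
theorem pvS14 (a0 a1 a2 a3 a4 a5 a6 a7 a8 a9 a10 a11 a12 a13 a14 : Int) (t : List Int) (v : Int) : PySem.List.pySetD (a0::a1::a2::a3::a4::a5::a6::a7::a8::a9::a10::a11::a12::a13::a14::t) 14 v = a0::a1::a2::a3::a4::a5::a6::a7::a8::a9::a10::a11::a12::a13::v::t := by simp [pysem]
theorem pvS15 (a0 a1 a2 a3 a4 a5 a6 a7 a8 a9 a10 a11 a12 a13 a14 a15 : Int) (t : List Int) (v : Int) : PySem.List.pySetD (a0::a1::a2::a3::a4::a5::a6::a7::a8::a9::a10::a11::a12::a13::a14::a15::t) 15 v = a0::a1::a2::a3::a4::a5::a6::a7::a8::a9::a10::a11::a12::a13::a14::v::t := by simp [pysem]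
theorem pvPop0 (a : Int) (t : List Int) : ((PySem.List.pop? (a::t) 0).map Prod.snd).getD (a::t) = t := by simp [pysem]
theorem pvPopL (a b c d e : Int) : ((PySem.List.pop? [a,b,c,d,e] (-1)).map Prod.snd).getD [a,b,c,d,e] = [a,b,c,d] := by
  simp [PySem.List.pop?, PySem.List.pyIdx?, List.eraseIdx]
theorem pvIns0 (l : List Int) (v : Int) : PySem.List.insert l 0 v = v::l := PySem.List.insert_zero l v

def flipB (z : Int) : Int := if z = 0 then 1 else 0

set_option maxHeartbeats 2000000 in
theorem fCore_eq (x0 x1 x2 x3 x4 x5 x6 x7 x8 x9 x10 x11 x12 x13 x14 x15 : Int) (r : List Int) :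
    fCore (x0::x1::x2::x3::x4::x5::x6::x7::x8::x9::x10::x11::x12::x13::x14::x15::r) =
      x1::x2::x3::x4::x5::x6::(PySem.Int.bxor (PySem.Int.bxor x0 x1) 1)::
      (flipB (PySem.Int.bxor (PySem.Int.bxor x11 x9) 1))::(flipB x7)::(flipB x8)::(flipB x9)::(flipB x10)::
      (PySem.List.pyGetD (int_to_array (PySem.Int.mod (array_to_int [x12,x13,x14,x15] + 1) 16) 4) 0 0)::
      (PySem.List.pyGetD (int_to_array (PySem.Int.mod (array_to_int [x12,x13,x14,x15] + 1) 16) 4) 1 0)::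
      (PySem.List.pyGetD (int_to_array (PySem.Int.mod (array_to_int [x12,x13,x14,x15] + 1) 16) 4) 2 0)::
      (PySem.List.pyGetD (int_to_array (PySem.Int.mod (array_to_int [x12,x13,x14,x15] + 1) 16) 4) 3 0)::r := by
  have d70 : PySem.Dict.getD f_map7 0 0 = 0 := by decide
  have d71 : PySem.Dict.getD f_map7 1 0 = 1 := by decide
  have d72 : PySem.Dict.getD f_map7 2 0 = 2 := by decide
  have d73 : PySem.Dict.getD f_map7 3 0 = 3 := by decide
  have d74 : PySem.Dict.getD f_map7 4 0 = 4 := by decide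
  have d75 : PySem.Dict.getD f_map7 5 0 = 5 := by decide
  have d76 : PySem.Dict.getD f_map7 6 0 = 6 := by decide
  have d50 : PySem.Dict.getD f_map5 0 0 = 7 := by decide
  have d51 : PySem.Dict.getD f_map5 1 0 = 8 := by decide
  have d52 : PySem.Dict.getD f_map5 2 0 = 9 := by decide
  have d53 : PySem.Dict.getD f_map5 3 0 = 10 := by decide
  have d54 : PySem.Dict.getD f_map5 4 0 = 11 := by decide
  have dc0 : PySem.Dict.getD f_mapc 0 0 = 12 := by decide
  have dc1 : PySem.Dict.getD f_mapc 1 0 = 13 := by decide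
  have dc2 : PySem.Dict.getD f_mapc 2 0 = 14 := by decide
  have dc3 : PySem.Dict.getD f_mapc 3 0 = 15 := by decide
  have hr7 : PySem.List.pyRange 0 7 1 = [0,1,2,3,4,5,6] := by decide
  have hr5 : PySem.List.pyRange 0 5 1 = [0,1,2,3,4] := by decide
  have hr4 : PySem.List.pyRange 0 4 1 = [0,1,2,3] := by decide
  simp only [fCore, hr7, hr5, hr4, List.map_cons, List.map_nil, List.foldl_cons, List.foldl_nil,
    d70, d71, d72, d73, d74, d75, d76, d50, d51, d52, d53, d54, dc0, dc1, dc2, dc3,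
    pvG0, pvG1, pvG2, pvG3, pvG4, pvG5, pvG6, pvG7, pvG8, pvG9, pvG10, pvG11, pvG12, pvG13, pvG14, pvG15,
    pvPop0, pvPopL, pvIns0]
  simp only [pvG3, pvG4, pvG5, pvG6,
    pvS0, pvS1, pvS2, pvS3, pvS4, pvS5, pvS6, pvS7, pvS8, pvS9, pvS10, pvS11, pvS12, pvS13, pvS14, pvS15]
  simp only [flipB]
  norm_num [pvG0, pvG1, pvG2, pvG3, pvG4, pvG5, pvG6]

-- ---- binary digit lists ----

def bits : Nat → Nat → List Int
  | 0, _ => []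
  | k+1, n => bits k (n / 2) ++ [((n % 2 : Nat) : Int)]

theorem bits_length (k : Nat) : ∀ n, (bits k n).length = k := by
  induction k with
  | zero => intro n; rfl
  | succ k ih => intro n; simp [bits, ih]

theorem bits_binary (k : Nat) : ∀ n, ∀ d ∈ bits k n, d = 0 ∨ d = 1 := by
  induction k with
  | zero => simp [bits]
  | succ k ih =>
    intro n d hd
    simp only [bits, List.mem_append, List.mem_singleton] at hd
    rcases hd with hd | hd
    · exact ih _ _ hd
    · rcases Nat.mod_two_eq_zero_or_one n with h | h <;> simp [hd, h]

theorem bits_zero (k : Nat) : bits k 0 = List.replicate k 0 := by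
  induction k with
  | zero => rfl
  | succ k ih => simp [bits, ih, List.replicate_succ']

theorem bits_append (k s : Nat) : ∀ n, bits (k + s) n = bits k (n / 2 ^ s) ++ bits s n := by
  induction s with
  | zero => intro n; simp [bits]
  | succ s ih =>
    intro n
    show bits ((k + s) + 1) n = _
    rw [bits, ih (n / 2)]
    simp only [bits, List.append_assoc]
    rw [Nat.div_div_eq_div_mul, ← Nat.pow_succ']

def arrVal (l : List Int) : Int := l.foldl (fun a d => 2*a + d) 0

theorem foldl_arrVal (v : List Int) : ∀ (a : Int), v.foldl (fun a d => 2*a + d) a = a * 2^v.length + arrVal v := by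
  induction v with
  | nil => intro a; simp [arrVal]
  | cons d t ih =>
    intro a
    simp only [List.foldl_cons, List.length_cons, arrVal] at *
    rw [ih (2*a + d), ih (2*0 + d)]
    ring

theorem arrVal_append (u v : List Int) : arrVal (u ++ v) = arrVal u * 2 ^ v.length + arrVal v := by
  unfold arrVal
  rw [List.foldl_append, foldl_arrVal]
  rfl

theorem arrVal_bits (k : Nat) : ∀ n, arrVal (bits k n) = ((n % 2^k : Nat) : Int) := by
  induction k with
  | zero => intro n; simp [bits, arrVal]
  | succ k ih =>
    intro n
    show arrVal (bits k (n/2) ++ [((n % 2 : Nat) : Int)]) = _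
    rw [arrVal_append, ih]
    have h2 : n % 2^(k+1) = 2 * (n / 2 % 2^k) + n % 2 := by
      rw [Nat.pow_succ', Nat.mod_mul]; omega
    rw [h2]
    simp [arrVal]
    push_cast
    ring

-- ---- format(x,'b') as a digit recursion ----

def binCharsAux (n : Nat) : List Char :=
  if _h : n = 0 then [] else binCharsAux (n / 2) ++ [if n % 2 = 1 then '1' else '0']
  termination_by n
  decreasing_by exact Nat.div_lt_self (Nat.pos_of_ne_zero _h) (by omega)

theorem binCharsAux_zero : binCharsAux 0 = [] := by
  rw [binCharsAux]; simp

theorem binCharsAux_chars (n : Nat) : ∀ c ∈ binCharsAux n, c = '0' ∨ c = '1' := by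
  induction n using Nat.strong_induction_on with
  | _ n ih =>
    by_cases h : n = 0
    · subst h; rw [binCharsAux]; simp
    · rw [binCharsAux]
      simp only [h, dite_false, List.mem_append, List.mem_singleton]
      intro c hc
      rcases hc with hc | hc
      · exact ih _ (Nat.div_lt_self (Nat.pos_of_ne_zero h) (by omega)) _ hc
      · rcases Nat.mod_two_eq_zero_or_one n with h2 | h2 <;> simp [hc, h2]

theorem binCharsAux_ne_nil (n : Nat) (h : n ≠ 0) : binCharsAux n ≠ [] := by
  rw [binCharsAux]; simp [h]

theorem binCharsAux_map (n : Nat) : (binCharsAux n).map chInt = bits (binCharsAux n).length n := by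
  induction n using Nat.strong_induction_on with
  | _ n ih =>
    by_cases h : n = 0
    · subst h; rw [binCharsAux]; simp [bits]
    · rw [binCharsAux]
      simp only [h, dite_false, List.map_append, List.length_append, List.map_cons, List.map_nil,
        List.length_cons, List.length_nil]
      rw [ih _ (Nat.div_lt_self (Nat.pos_of_ne_zero h) (by omega))]
      show _ = bits ((binCharsAux (n/2)).length + 1) n
      rw [bits]
      congr 1
      rcases Nat.mod_two_eq_zero_or_one n with h2 | h2 <;> simp [h2, chInt] <;> decide

theorem toDigitsCore_eq (fuel : Nat) : ∀ (n : Nat) (acc : List Char), 0 < n → n < fuel →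
    Nat.toDigitsCore 2 fuel n acc = binCharsAux n ++ acc := by
  induction fuel with
  | zero => intro n acc h1 h2; omega
  | succ fuel ih =>
    intro n acc h1 h2
    show Nat.toDigitsCore 2 (fuel+1) n acc = _
    rw [Nat.toDigitsCore]
    by_cases h3 : n / 2 = 0
    · have hn1 : n = 1 := by omega
      subst hn1
      norm_num [binCharsAux, binCharsAux_zero, Nat.digitChar]
    · simp only [h3, if_false]
      rw [ih (n/2) _ (by omega) (by omega)]
      conv_rhs => rw [binCharsAux]
      rw [dif_neg (by omega)]
      rw [List.append_assoc]
      congr 1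
      rcases Nat.mod_two_eq_zero_or_one n with h | h <;> simp [h] <;> rfl

theorem toBinChars_eq (x : Int) (hx : 0 < x) : PySem.Int.toBinChars x = binCharsAux x.toNat := by
  unfold PySem.Int.toBinChars
  rw [if_neg (by omega)]
  show Nat.toDigits 2 x.toNat = _
  unfold Nat.toDigits
  rw [toDigitsCore_eq _ _ _ (by omega) (by omega)]
  simp

theorem toBinChars_zero : PySem.Int.toBinChars 0 = ['0'] := by decide

theorem binCharsAux_len (n : Nat) : (binCharsAux n).length = PySem.Int.bitLength (n : Int) := by
  induction n using Nat.strong_induction_on with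
  | _ n ih =>
    by_cases h : n = 0
    · subst h; rw [binCharsAux]; simp [PySem.Int.bitLength_zero]
    · rw [binCharsAux, dif_neg h]
      rw [List.length_append]
      simp only [List.length_cons, List.length_nil]
      rw [ih _ (Nat.div_lt_self (Nat.pos_of_ne_zero h) (by omega))]
      rw [PySem.Int.bitLength_natCast (m := n) (Nat.pos_of_ne_zero h)]

theorem lt_two_pow_len (n : Nat) : n < 2 ^ (binCharsAux n).length := by
  have := PySem.Int.lt_two_pow_bitLength (n : Int)
  rw [binCharsAux_len]
  simpa using this

theorem len_le_of_lt (m k : Nat) (h : m < 2^k) : (binCharsAux m).length ≤ k := by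
  by_contra hc
  push_neg at hc
  by_cases hm : m = 0
  · subst hm
    rw [binCharsAux_zero] at hc
    simp at hc
  · have h2 := PySem.Int.two_pow_bitLength_le (m : Int) (by exact_mod_cast hm)
    rw [← binCharsAux_len] at h2
    simp only [Int.natAbs_natCast] at h2
    have h3 : 2^k ≤ 2^((binCharsAux m).length - 1) := Nat.pow_le_pow_right (by omega) (by omega)
    omega

-- ---- int_to_array / array_to_int characterisations ----

theorem int_to_array_eq (w : Nat) (hw : 0 < w) (x : Int) (hx : 0 ≤ x) :
    int_to_array x (w : Int) = bits (max (binCharsAux x.toNat).length w) x.toNat := by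
  rcases eq_or_lt_of_le hx with h0 | hpos
  · -- x = 0
    have hx0 : x = 0 := h0.symm
    subst hx0
    show (PySem.Chars.zfill (PySem.Int.toBinChars 0) ↑w).map chInt = _
    rw [toBinChars_zero]
    have hb0 : binCharsAux (Int.toNat 0) = [] := binCharsAux_zero
    rw [hb0]
    simp only [List.length_nil, Nat.zero_max, Nat.max_eq_right (Nat.zero_le w)]
    by_cases hw1 : (w : Int) ≤ 1
    · have hw' : w = 1 := by omega
      subst hw'
      simp only [Nat.cast_one]
      rw [show PySem.Chars.zfill ['0'] 1 = ['0'] from by decide]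
      show [chInt '0'] = bits 1 (Int.toNat 0)
      decide
    · unfold PySem.Chars.zfill
      rw [if_neg (by simpa using hw1)]
      have hns : ¬('0' = '+' ∨ '0' = '-') := by decide
      simp only [hns, if_false, List.length_cons, List.length_nil, Int.toNat_natCast]
      rw [List.map_append, List.map_replicate]
      simp only [List.map_cons, List.map_nil]
      rw [show chInt '0' = 0 from by decide]
      rw [show (Int.toNat 0) = 0 from rfl, bits_zero]
      rw [← List.replicate_succ']
      congr 1
      omega
  · -- x > 0
    show (PySem.Chars.zfill (PySem.Int.toBinChars x) ↑w).map chInt = _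
    rw [toBinChars_eq x hpos]
    by_cases hwL : (w : Int) ≤ ((binCharsAux x.toNat).length : Int)
    · have hz : PySem.Chars.zfill (binCharsAux x.toNat) ↑w = binCharsAux x.toNat := by
        unfold PySem.Chars.zfill
        rw [if_pos (by exact_mod_cast hwL)]
      rw [hz]
      rw [Nat.max_eq_left (by exact_mod_cast hwL)]
      exact binCharsAux_map x.toNat
    · push_neg at hwL
      have hLw : (binCharsAux x.toNat).length < w := by exact_mod_cast hwL
      obtain ⟨c, rest, hcr⟩ := List.exists_cons_of_ne_nil (binCharsAux_ne_nil x.toNat (by omega))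
      have hcs : c = '0' ∨ c = '1' := binCharsAux_chars x.toNat c (by rw [hcr]; simp)
      have hz : PySem.Chars.zfill (binCharsAux x.toNat) ↑w =
          List.replicate (w - (binCharsAux x.toNat).length) '0' ++ binCharsAux x.toNat := by
        unfold PySem.Chars.zfill
        rw [if_neg (by push_neg; exact_mod_cast hwL)]
        rw [hcr]
        have hns : ¬(c = '+' ∨ c = '-') := by rcases hcs with rfl | rfl <;> decide
        simp only [hns, if_false]
        rw [← hcr]
        congr 2 <;> omega
      rw [hz, List.map_append, List.map_replicate]
      rw [show chInt '0' = 0 from by decide, binCharsAux_map]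
      rw [Nat.max_eq_right (le_of_lt hLw)]
      have hw2 : w = (w - (binCharsAux x.toNat).length) + (binCharsAux x.toNat).length := by omega
      rw [hw2, bits_append]
      rw [Nat.div_eq_of_lt (lt_two_pow_len x.toNat), bits_zero]
      rw [← hw2]

theorem flatMap_fold (arr : List Int) : (∀ d ∈ arr, d = 0 ∨ d = 1) → ∀ (a : Int),
    (arr.flatMap (fun i => PySem.Int.toChars i)).foldl (fun a c => 2 * a + ((c.toNat : Int) - 48)) a =
      arr.foldl (fun a d => 2*a + d) a := by
  induction arr with
  | nil => intro _ a; rfl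
  | cons d t ih =>
    intro h a
    rw [List.flatMap_cons, List.foldl_append]
    rcases h d (by simp) with rfl | rfl
    · rw [show PySem.Int.toChars 0 = ['0'] from by decide]
      simp only [List.foldl_cons, List.foldl_nil]
      rw [show ((('0'.toNat : Nat)) : Int) - 48 = 0 from by decide]
      rw [ih (fun d hd => h d (by simp [hd]))]
    · rw [show PySem.Int.toChars 1 = ['1'] from by decide]
      simp only [List.foldl_cons, List.foldl_nil]
      rw [show ((('1'.toNat : Nat)) : Int) - 48 = 1 from by decide]
      rw [ih (fun d hd => h d (by simp [hd]))]

theorem array_to_int_eq (arr : List Int) (h : ∀ d ∈ arr, d = 0 ∨ d = 1) :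
    array_to_int arr = arrVal arr := by
  unfold array_to_int arrVal
  exact flatMap_fold arr h 0

-- ---- list destructuring ----

theorem exists_len7 (l : List Int) (h : l.length = 7) :
    ∃ a0 a1 a2 a3 a4 a5 a6 : Int, l = [a0,a1,a2,a3,a4,a5,a6] := by
  rcases l with _|⟨a0,_|⟨a1,_|⟨a2,_|⟨a3,_|⟨a4,_|⟨a5,_|⟨a6,_|⟨a7,t⟩⟩⟩⟩⟩⟩⟩⟩ <;>
    first
      | (exact ⟨_,_,_,_,_,_,_, rfl⟩)
      | (exfalso; simp at h)

theorem exists_len5 (l : List Int) (h : l.length = 5) :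
    ∃ a0 a1 a2 a3 a4 : Int, l = [a0,a1,a2,a3,a4] := by
  rcases l with _|⟨a0,_|⟨a1,_|⟨a2,_|⟨a3,_|⟨a4,_|⟨a5,t⟩⟩⟩⟩⟩⟩ <;>
    first
      | (exact ⟨_,_,_,_,_, rfl⟩)
      | (exfalso; simp at h)

theorem exists_len4 (l : List Int) (h : l.length = 4) :
    ∃ a0 a1 a2 a3 : Int, l = [a0,a1,a2,a3] := by
  rcases l with _|⟨a0,_|⟨a1,_|⟨a2,_|⟨a3,_|⟨a4,t⟩⟩⟩⟩⟩ <;>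
    first
      | (exact ⟨_,_,_,_, rfl⟩)
      | (exfalso; simp at h)


-- ---- the 16-bit components, list side vs bit side ----

set_option maxHeartbeats 2000000 in
theorem comp7 (x0 x1 x2 x3 x4 x5 x6 : Int)
    (h0 : x0 = 0 ∨ x0 = 1) (h1 : x1 = 0 ∨ x1 = 1) (h2 : x2 = 0 ∨ x2 = 1) (h3 : x3 = 0 ∨ x3 = 1)
    (h4 : x4 = 0 ∨ x4 = 1) (h5 : x5 = 0 ∨ x5 = 1) (h6 : x6 = 0 ∨ x6 = 1) :
    arrVal [x1,x2,x3,x4,x5,x6, PySem.Int.bxor (PySem.Int.bxor x0 x1) 1] =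
      f_alt_lfsr7 (arrVal [x0,x1,x2,x3,x4,x5,x6]) := by
  rcases h0 with rfl|rfl <;> rcases h1 with rfl|rfl <;> rcases h2 with rfl|rfl <;>
    rcases h3 with rfl|rfl <;> rcases h4 with rfl|rfl <;> rcases h5 with rfl|rfl <;>
    rcases h6 with rfl|rfl <;> decide

set_option maxHeartbeats 1000000 in
theorem comp5 (x7 x8 x9 x10 x11 : Int)
    (h7 : x7 = 0 ∨ x7 = 1) (h8 : x8 = 0 ∨ x8 = 1) (h9 : x9 = 0 ∨ x9 = 1)
    (h10 : x10 = 0 ∨ x10 = 1) (h11 : x11 = 0 ∨ x11 = 1) :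
    arrVal [flipB (PySem.Int.bxor (PySem.Int.bxor x11 x9) 1), flipB x7, flipB x8, flipB x9, flipB x10] =
      f_alt_lfsr5 (arrVal [x7,x8,x9,x10,x11]) := by
  rcases h7 with rfl|rfl <;> rcases h8 with rfl|rfl <;> rcases h9 with rfl|rfl <;>
    rcases h10 with rfl|rfl <;> rcases h11 with rfl|rfl <;> decide

theorem flipB_binary (z : Int) : flipB z = 0 ∨ flipB z = 1 := by
  unfold flipB; split <;> simp

theorem bxor_binary (a b : Int) (ha : a = 0 ∨ a = 1) (hb : b = 0 ∨ b = 1) :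
    PySem.Int.bxor a b = 0 ∨ PySem.Int.bxor a b = 1 := by
  rcases ha with rfl|rfl <;> rcases hb with rfl|rfl <;> decide

-- ---- cast helpers for the bit side ----

def natB7 (v : Nat) : Nat := (v <<< 1 ||| ((v >>> 6 ^^^ v >>> 5 ^^^ 1) &&& 1)) &&& 127

def natB5 (v : Nat) : Nat := ((((v ^^^ v >>> 2 ^^^ 1) &&& 1) <<< 4) ||| v >>> 1) ^^^ 31

theorem B7_cast (v : Nat) : f_alt_lfsr7 ((v : Nat) : Int) = ((natB7 v : Nat) : Int) := by
  show PySem.Int.band (PySem.Int.bor ((v:Int) <<< (1:Nat))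
    (PySem.Int.band (PySem.Int.bxor (PySem.Int.bxor ((v:Int) >>> (6:Nat)) ((v:Int) >>> (5:Nat))) 1) 1)) 0x7F = _
  rw [show (1:Int) = ((1:Nat):Int) from rfl, show (0x7F:Int) = ((127:Nat):Int) from rfl]
  rw [← Int.natCast_shiftLeft, ← Int.natCast_shiftRight, ← Int.natCast_shiftRight]
  rw [PySem.Int.bxor_natCast, PySem.Int.bxor_natCast, PySem.Int.band_natCast,
    PySem.Int.bor_natCast, PySem.Int.band_natCast]
  rfl

theorem B5_cast (v : Nat) : f_alt_lfsr5 ((v : Nat) : Int) = ((natB5 v : Nat) : Int) := by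
  show PySem.Int.bxor (PySem.Int.bor
    ((PySem.Int.band (PySem.Int.bxor (PySem.Int.bxor (v:Int) ((v:Int) >>> (2:Nat))) 1) 1) <<< (4:Nat))
    ((v:Int) >>> (1:Nat))) 0x1F = _
  rw [show (1:Int) = ((1:Nat):Int) from rfl, show (0x1F:Int) = ((31:Nat):Int) from rfl]
  rw [← Int.natCast_shiftRight, ← Int.natCast_shiftRight]
  rw [PySem.Int.bxor_natCast, PySem.Int.bxor_natCast, PySem.Int.band_natCast]
  rw [← Int.natCast_shiftLeft, PySem.Int.bor_natCast, PySem.Int.bxor_natCast]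
  rfl

theorem natB5_lt (v : Nat) (hv : v < 32) : natB5 v < 32 := by
  unfold natB5
  apply Nat.xor_lt_two_pow (n := 5)
  · apply Nat.or_lt_two_pow (n := 5)
    · rw [Nat.shiftLeft_eq]
      have h : (v ^^^ v >>> 2 ^^^ 1) &&& 1 ≤ 1 := by
        rw [show (1:Nat) = 2^1 - 1 from rfl, Nat.and_two_pow_sub_one_eq_mod]
        omega
      omega
    · rw [Nat.shiftRight_eq_div_pow]
      omega
  · norm_num

theorem or_add_eq (u v k : Nat) (hv : v < 2^k) : (u <<< k) ||| v = u * 2^k + v := by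
  rw [Nat.shiftLeft_eq, mul_comm u (2^k), ← Nat.two_pow_add_eq_or_of_lt hv]

-- ---- main equivalence ----

set_option maxHeartbeats 4000000 in
set_option maxRecDepth 10000 in
theorem pvMain (x : Int) (hx : 0 ≤ x) : f x = f_alt x := by
  lift x to Nat using hx with n
  obtain ⟨s, hsdef⟩ : ∃ s, max (binCharsAux n).length 16 - 16 = s := ⟨_, rfl⟩
  obtain ⟨hi, hhidef⟩ : ∃ h, n / 2^s = h := ⟨_, rfl⟩
  -- the start array, split 7/5/4/low
  have harr : int_to_array (n : Int) 16 = bits (16 + s) n := by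
    have h := int_to_array_eq 16 (by norm_num) (n : Int) (Int.natCast_nonneg n)
    rw [show ((16:Nat) : Int) = (16 : Int) from rfl] at h
    rw [h, Int.toNat_natCast, show max (binCharsAux n).length 16 = 16 + s by omega]
  have h16 : bits 16 hi = bits 7 (hi / 2^9) ++ (bits 5 (hi / 2^4) ++ bits 4 hi) := by
    have e1 : bits 16 hi = bits 12 (hi / 2^4) ++ bits 4 hi := bits_append 12 4 hi
    have e2 : bits 12 (hi / 2^4) = bits 7 (hi / 2^4 / 2^5) ++ bits 5 (hi / 2^4) := bits_append 7 5 _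
    rw [e1, e2, List.append_assoc, Nat.div_div_eq_div_mul]
    norm_num
  obtain ⟨a0,a1,a2,a3,a4,a5,a6, ha⟩ := exists_len7 (bits 7 (hi / 2^9)) (bits_length 7 _)
  obtain ⟨b0,b1,b2,b3,b4, hb⟩ := exists_len5 (bits 5 (hi / 2^4)) (bits_length 5 _)
  obtain ⟨c0,c1,c2,c3, hc⟩ := exists_len4 (bits 4 hi) (bits_length 4 _)
  have hba := bits_binary 7 (hi/2^9); rw [ha] at hba
  have hbb := bits_binary 5 (hi/2^4); rw [hb] at hbb
  have hbc := bits_binary 4 hi; rw [hc] at hbc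
  have A0 : a0 = 0 ∨ a0 = 1 := hba a0 (by simp)
  have A1 : a1 = 0 ∨ a1 = 1 := hba a1 (by simp)
  have A2 : a2 = 0 ∨ a2 = 1 := hba a2 (by simp)
  have A3 : a3 = 0 ∨ a3 = 1 := hba a3 (by simp)
  have A4 : a4 = 0 ∨ a4 = 1 := hba a4 (by simp)
  have A5 : a5 = 0 ∨ a5 = 1 := hba a5 (by simp)
  have A6 : a6 = 0 ∨ a6 = 1 := hba a6 (by simp)
  have B0 : b0 = 0 ∨ b0 = 1 := hbb b0 (by simp)
  have B1 : b1 = 0 ∨ b1 = 1 := hbb b1 (by simp)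
  have B2 : b2 = 0 ∨ b2 = 1 := hbb b2 (by simp)
  have B3 : b3 = 0 ∨ b3 = 1 := hbb b3 (by simp)
  have B4 : b4 = 0 ∨ b4 = 1 := hbb b4 (by simp)
  have C0 : c0 = 0 ∨ c0 = 1 := hbc c0 (by simp)
  have C1 : c1 = 0 ∨ c1 = 1 := hbc c1 (by simp)
  have C2 : c2 = 0 ∨ c2 = 1 := hbc c2 (by simp)
  have C3 : c3 = 0 ∨ c3 = 1 := hbc c3 (by simp)
  have hfull : int_to_array (n:Int) 16 =
      a0::a1::a2::a3::a4::a5::a6::b0::b1::b2::b3::b4::c0::c1::c2::c3::(bits s n) := by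
    rw [harr, show (16 + s) = 16 + s from rfl, bits_append 16 s n, ← hhidef] at *
    rw [harr, h16, ha, hb, hc]
    simp only [List.cons_append, List.nil_append]
  have hstep : f (n:Int) = array_to_int (fCore (int_to_array (n:Int) 16)) := rfl
  rw [hstep, hfull, fCore_eq]
  -- counter
  have hc4val : array_to_int [c0,c1,c2,c3] = ((hi % 2^4 : Nat) : Int) := by
    rw [array_to_int_eq _ hbc, ← hc, arrVal_bits]
  have hcu : PySem.Int.mod (array_to_int [c0,c1,c2,c3] + 1) 16 = (((hi+1) % 16 : Nat) : Int) := by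
    rw [hc4val]
    rw [show (((hi % 2^4 : Nat)) : Int) + 1 = (((hi % 2^4 + 1 : Nat)) : Int) by push_cast; ring]
    rw [show (16:Int) = ((16:Nat):Int) from rfl, PySem.Int.mod_natCast]
    exact congrArg Nat.cast (by omega : (hi % 2^4 + 1) % 16 = (hi + 1) % 16)
  have hcarr : int_to_array (PySem.Int.mod (array_to_int [c0,c1,c2,c3] + 1) 16) 4 =
      bits 4 ((hi+1) % 16) := by
    rw [hcu]
    have h := int_to_array_eq 4 (by norm_num) ((((hi+1) % 16 : Nat)) : Int) (Int.natCast_nonneg _)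
    rw [show ((4:Nat) : Int) = (4 : Int) from rfl] at h
    have hlt : (hi+1) % 16 < 2^4 := by
      have := Nat.mod_lt (hi+1) (show 0 < 16 by norm_num)
      omega
    rw [h, Int.toNat_natCast, Nat.max_eq_right (len_le_of_lt _ 4 hlt)]
  obtain ⟨d0,d1,d2,d3, hd⟩ := exists_len4 (bits 4 ((hi+1) % 16)) (bits_length 4 _)
  have hbd := bits_binary 4 ((hi+1) % 16); rw [hd] at hbd
  have D0 : d0 = 0 ∨ d0 = 1 := hbd d0 (by simp)
  have D1 : d1 = 0 ∨ d1 = 1 := hbd d1 (by simp)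
  have D2 : d2 = 0 ∨ d2 = 1 := hbd d2 (by simp)
  have D3 : d3 = 0 ∨ d3 = 1 := hbd d3 (by simp)
  rw [hcarr, hd, pvG0, pvG1, pvG2, pvG3]
  -- value of the result array
  have hbinall : ∀ d ∈ (a1::a2::a3::a4::a5::a6::(PySem.Int.bxor (PySem.Int.bxor a0 a1) 1)::
      (flipB (PySem.Int.bxor (PySem.Int.bxor b4 b2) 1))::(flipB b0)::(flipB b1)::(flipB b2)::(flipB b3)::
      d0::d1::d2::d3::(bits s n)), d = 0 ∨ d = 1 := by
    intro d hd2
    simp only [List.mem_cons] at hd2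
    rcases hd2 with rfl|rfl|rfl|rfl|rfl|rfl|rfl|rfl|rfl|rfl|rfl|rfl|rfl|rfl|rfl|rfl|hd2
    exacts [A1, A2, A3, A4, A5, A6,
      bxor_binary _ _ (bxor_binary _ _ A0 A1) (Or.inr rfl),
      flipB_binary _, flipB_binary _, flipB_binary _, flipB_binary _, flipB_binary _,
      D0, D1, D2, D3, bits_binary s n d hd2]
  rw [array_to_int_eq _ hbinall]
  have hshape : (a1::a2::a3::a4::a5::a6::(PySem.Int.bxor (PySem.Int.bxor a0 a1) 1)::
      (flipB (PySem.Int.bxor (PySem.Int.bxor b4 b2) 1))::(flipB b0)::(flipB b1)::(flipB b2)::(flipB b3)::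
      d0::d1::d2::d3::(bits s n)) =
      [a1,a2,a3,a4,a5,a6, PySem.Int.bxor (PySem.Int.bxor a0 a1) 1] ++
      ([flipB (PySem.Int.bxor (PySem.Int.bxor b4 b2) 1), flipB b0, flipB b1, flipB b2, flipB b3] ++
       ([d0,d1,d2,d3] ++ bits s n)) := by
    simp only [List.cons_append, List.nil_append]
  rw [hshape, arrVal_append, arrVal_append, arrVal_append]
  simp only [List.length_append, List.length_cons, List.length_nil, bits_length]
  rw [comp7 a0 a1 a2 a3 a4 a5 a6 A0 A1 A2 A3 A4 A5 A6,
      comp5 b0 b1 b2 b3 b4 B0 B1 B2 B3 B4]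
  have hva : arrVal [a0,a1,a2,a3,a4,a5,a6] = ((hi / 2^9 % 2^7 : Nat) : Int) := by
    rw [← ha, arrVal_bits]
  have hvb : arrVal [b0,b1,b2,b3,b4] = ((hi / 2^4 % 2^5 : Nat) : Int) := by
    rw [← hb, arrVal_bits]
  have hvd : arrVal [d0,d1,d2,d3] = (((hi+1) % 16 : Nat) : Int) := by
    rw [← hd, arrVal_bits]
    exact congrArg Nat.cast (Nat.mod_eq_of_lt (by
      have := Nat.mod_lt (hi+1) (show 0 < 16 by norm_num)
      omega))
  have hvr : arrVal (bits s n) = ((n % 2^s : Nat) : Int) := arrVal_bits s n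
  rw [hva, hvb, hvd, hvr, B7_cast, B5_cast]
  -- B side
  show _ = f_alt ↑n
  simp only [f_alt, f_alt_step16]
  rw [show max (PySem.Int.bitLength ((n:Nat):Int)) 16 - 16 = s by rw [← binCharsAux_len]; exact hsdef]
  have hxs : ((n:Int) >>> s) = ((hi : Nat) : Int) := by
    rw [← Int.natCast_shiftRight]
    exact congrArg Nat.cast (by rw [Nat.shiftRight_eq_div_pow, hhidef])
  rw [hxs]
  have hl7 : PySem.Int.band (((hi:Nat):Int) >>> (9:Nat)) 0x7F = ((hi / 2^9 % 2^7 : Nat) : Int) := by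
    rw [← Int.natCast_shiftRight, show (0x7F:Int) = ((127:Nat):Int) from rfl, PySem.Int.band_natCast]
    exact congrArg Nat.cast (by rw [Nat.shiftRight_eq_div_pow, show (127:Nat) = 2^7-1 from rfl, Nat.and_two_pow_sub_one_eq_mod])
  have hl5 : PySem.Int.band (((hi:Nat):Int) >>> (4:Nat)) 0x1F = ((hi / 2^4 % 2^5 : Nat) : Int) := by
    rw [← Int.natCast_shiftRight, show (0x1F:Int) = ((31:Nat):Int) from rfl, PySem.Int.band_natCast]
    exact congrArg Nat.cast (by rw [Nat.shiftRight_eq_div_pow, show (31:Nat) = 2^5-1 from rfl, Nat.and_two_pow_sub_one_eq_mod])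
  have hcnt : PySem.Int.band (((hi:Nat):Int) + 1) 0xF = (((hi+1) % 16 : Nat) : Int) := by
    rw [show ((hi:Nat):Int) + 1 = ((hi+1 : Nat) : Int) by push_cast; ring,
        show (0xF:Int) = ((15:Nat):Int) from rfl, PySem.Int.band_natCast]
    exact congrArg Nat.cast (by rw [show (15:Nat) = 2^4-1 from rfl, Nat.and_two_pow_sub_one_eq_mod])
  rw [hl7, hl5, hcnt, B7_cast, B5_cast]
  have hcntlt : (hi+1) % 16 < 2^4 := by
    have := Nat.mod_lt (hi+1) (show 0 < 16 by norm_num)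
    omega
  have hstep16 : PySem.Int.bor (PySem.Int.bor
        (((natB7 (hi / 2^9 % 2^7) : Nat) : Int) <<< (9:Nat))
        (((natB5 (hi / 2^4 % 2^5) : Nat) : Int) <<< (4:Nat)))
        (((((hi+1) % 16 : Nat)) : Int)) =
      ((natB7 (hi / 2^9 % 2^7) * 2^9 + (natB5 (hi / 2^4 % 2^5) * 2^4 + (hi+1) % 16) : Nat) : Int) := by
    rw [← Int.natCast_shiftLeft, ← Int.natCast_shiftLeft, PySem.Int.bor_natCast, PySem.Int.bor_natCast]
    exact congrArg Nat.cast (by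
      rw [Nat.or_assoc, or_add_eq _ _ 4 hcntlt]
      rw [or_add_eq _ _ 9 (by
        have h1 := natB5_lt (hi / 2^4 % 2^5) (Nat.mod_lt _ (by norm_num))
        omega)])
  rw [hstep16]
  have hmask : PySem.Int.band ((n:Nat):Int) ((((1 <<< s : Nat)):Int) - 1) = ((n % 2^s : Nat) : Int) := by
    have h1 : 1 ≤ 1 <<< s := by rw [Nat.shiftLeft_eq, one_mul]; exact Nat.one_le_two_pow
    rw [show (1:Int) = ((1:Nat):Int) from rfl, ← Nat.cast_sub h1]
    rw [PySem.Int.band_natCast]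
    exact congrArg Nat.cast (by rw [Nat.shiftLeft_eq, one_mul, Nat.and_two_pow_sub_one_eq_mod])
  rw [hmask, ← Int.natCast_shiftLeft, PySem.Int.bor_natCast]
  rw [or_add_eq _ _ s (Nat.mod_lt _ (Nat.two_pow_pos s))]
  push_cast
  ring

-- ===== VERDICT (by name: the statement is the Claim_ definition above) =====
theorem f_spec : Claim_equal_f := by
  intro x _ hpre
  unfold Spec_f
  exact pvMain x hpre
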